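-- pv_equiv track=rewrite | github.com/Anuj-negi2207/Codeforces-Competition-Questions- | Disconnected Nodes (HackerRank).py | getMaxNewEdges
-- ===== SOURCE A (Python) =====
-- from collections import defaultdict as ddc
--
-- def getMaxNewEdges(g_nodes, g_from, g_to,disconnected_nodes):
--     graph = ddc(set)
--     n = g_nodes
--     for a,b in zip(g_from, g_to):
--         graph[a-1].add(b-1)
--         graph[b-1].add(a-1)
--
--     visited = [False]*n
--
--     def dfs(u):
--         visited[u] = True
--         ans = 1
--
--         for v in graph[u]:
--             if not visited[v]:
--                 ans += dfs(v)
--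
--         return ans
--
--
--     poss = []
--     for ele in disconnected_nodes:
--         poss.append(dfs(ele-1))
--
--     left = n - sum(poss)
--     ans = max(ele*left for ele in poss)
--
--     for i in range(n):
--         if not visited[i]:
--             ans -= (dfs(i) - 1)
--
--
--     return ans
-- ===== SOURCE B (Python) =====
-- from collections import defaultdict as ddc
--
-- def getMaxNewEdges(g_nodes, g_from, g_to, disconnected_nodes):
--     graph = ddc(set)
--     n = g_nodes
--     for a, b in zip(g_from, g_to):
--         graph[a-1].add(b-1)
--         graph[b-1].add(a-1)
--
--     visited = [False] * n
--
--     def explore(u):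
--         # iterative DFS, marking nodes as they are pushed
--         visited[u] = True
--         count = 1
--         stack = [u]
--         while stack:
--             x = stack.pop()
--             for v in graph[x]:
--                 if not visited[v]:
--                     visited[v] = True
--                     count += 1
--                     stack.append(v)
--         return count
--
--     poss = []
--     for ele in disconnected_nodes:
--         poss.append(explore(ele-1))
--
--     left = n - sum(poss)
--     ans = max(ele*left for ele in poss)
--
--     for i in range(n):
--         if not visited[i]:
--             ans -= (explore(i) - 1)
--
--     return ans
-- ===== Notes on version B (the rewrite author's own statement) =====
-- stated objective: alternative
-- what changed: The recursive dfs is replaced by the standard iterative mark-on-push stack traversal (explicit stack, nodes marked and counted when pushed); graph construction and the scoring code are unchanged. Pre_ excludes inputs where the traversal reads an out-of-window visited[] index (A raises IndexError) and inputs where two edge-bearing labels x and x+n alias one visited[] slot, where the result depends on traversal order and A's and B's orders legitimately differ.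
-- outside the precondition, e.g. on getMaxNewEdges(4, [3, -3, 2, -3, -2], [2, -3, 0, 3, -3], [-3, 2]): A returns -1, B returns -2; on getMaxNewEdges(5, [7, -2, 3, 5, -3, 4], [-5, -4, 4, -1, -2, -4], [-4, 0]): A returns 3, B returns 0
import Mathlib
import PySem

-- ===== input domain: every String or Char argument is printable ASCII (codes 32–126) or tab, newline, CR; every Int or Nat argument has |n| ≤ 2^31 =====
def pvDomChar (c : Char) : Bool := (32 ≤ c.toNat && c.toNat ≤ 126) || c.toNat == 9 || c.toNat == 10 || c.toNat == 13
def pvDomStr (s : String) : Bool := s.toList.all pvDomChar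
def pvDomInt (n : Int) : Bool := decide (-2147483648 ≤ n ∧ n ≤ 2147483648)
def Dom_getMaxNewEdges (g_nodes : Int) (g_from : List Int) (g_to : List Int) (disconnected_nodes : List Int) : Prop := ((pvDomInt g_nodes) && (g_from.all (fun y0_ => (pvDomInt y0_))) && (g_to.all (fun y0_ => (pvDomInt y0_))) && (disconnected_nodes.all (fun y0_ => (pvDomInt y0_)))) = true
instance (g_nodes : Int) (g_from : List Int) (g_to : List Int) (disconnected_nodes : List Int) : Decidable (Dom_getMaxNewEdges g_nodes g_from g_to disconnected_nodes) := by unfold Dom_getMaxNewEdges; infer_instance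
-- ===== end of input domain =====

-- B replaces A's recursive dfs by the standard iterative mark-on-push stack traversal
-- (alternative decomposition, same cost); graph construction and scoring are unchanged.

-- ===== PORT A =====
-- shared by both ports: graph construction (identical Python lines) and the
-- visited-array primitives (Python list indexing with negative-index semantics)
def pvGraph (g_from : List Int) (g_to : List Int) : PySem.Dict Int (PySem.Set Int) :=
  (g_from.zip g_to).foldl
    (fun g p =>
      let g1 := g.insert (p.1 - 1) (PySem.Set.add (g.getD (p.1 - 1) PySem.Set.empty) (p.2 - 1))
      g1.insert (p.2 - 1) (PySem.Set.add (g1.getD (p.2 - 1) PySem.Set.empty) (p.1 - 1)))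
    PySem.Dict.empty

def pvNbrs (g : PySem.Dict Int (PySem.Set Int)) (u : Int) : List Int :=
  g.getD u PySem.Set.empty

def pvVis (vis : List Bool) (v : Int) : Bool := PySem.List.pyGetD vis v true

def pvMark (vis : List Bool) (v : Int) : List Bool := PySem.List.pySetD vis v true

def pvFree (vis : List Bool) : Nat := vis.count false

lemma pvMark_length (vis : List Bool) (v : Int) : (pvMark vis v).length = vis.length := by
  unfold pvMark PySem.List.pySetD PySem.List.pySet?
  cases h : PySem.List.pyIdx? vis.length v <;> simp

lemma pvCountSet_le (l : List Bool) (j : Nat) : (l.set j true).count false ≤ l.count false := by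
  induction l generalizing j with
  | nil => simp
  | cons x xs ih =>
    cases j with
    | zero => cases x <;> simp [List.count_cons] <;> omega
    | succ j => cases x <;> simp [List.count_cons] <;> exact ih j

lemma pvCountSet_eq (l : List Bool) (j : Nat) (hj : j < l.length) (hx : l[j] = false) :
    (l.set j true).count false + 1 = l.count false := by
  induction l generalizing j with
  | nil => simp at hj
  | cons x xs ih =>
    cases j with
    | zero => simp_all [List.count_cons]
    | succ j =>
      simp only [List.set_cons_succ, List.count_cons]
      have := ih j (by simpa using hj) (by simpa using hx)
      omega

lemma pvVis_false_elim {vis : List Bool} {v : Int} (h : pvVis vis v = false) :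
    ∃ k, PySem.List.pyIdx? vis.length v = some k ∧ ∃ hk : k < vis.length, vis[k] = false := by
  unfold pvVis PySem.List.pyGetD PySem.List.pyGet? at h
  cases hk : PySem.List.pyIdx? vis.length v with
  | none => rw [hk] at h; simp at h
  | some k =>
    rw [hk] at h
    replace h : (vis[k]?).getD true = false := h
    cases hg : vis[k]? with
    | none => rw [hg] at h; simp at h
    | some b =>
      rw [hg] at h
      simp at h
      have hlt : k < vis.length := (List.getElem?_eq_some_iff.mp hg).1
      refine ⟨k, rfl, hlt, ?_⟩
      have := (List.getElem?_eq_some_iff.mp hg).2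
      rw [this]; simp [h]

lemma pvMark_of_idx {vis : List Bool} {v : Int} {k : Nat}
    (hk : PySem.List.pyIdx? vis.length v = some k) : pvMark vis v = vis.set k true := by
  unfold pvMark PySem.List.pySetD PySem.List.pySet?
  rw [hk]; rfl

lemma pvFree_mark_le (vis : List Bool) (v : Int) : pvFree (pvMark vis v) ≤ pvFree vis := by
  unfold pvFree
  cases hk : PySem.List.pyIdx? vis.length v with
  | none =>
    unfold pvMark PySem.List.pySetD PySem.List.pySet?
    rw [hk]; simp
  | some k => rw [pvMark_of_idx hk]; exact pvCountSet_le vis k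

lemma pvFree_mark_eq {vis : List Bool} {v : Int} (h : pvVis vis v = false) :
    pvFree (pvMark vis v) + 1 = pvFree vis := by
  obtain ⟨k, hk, hlt, hx⟩ := pvVis_false_elim h
  rw [pvMark_of_idx hk]
  exact pvCountSet_eq vis k hlt hx

lemma pvFree_mark_lt {vis : List Bool} {v : Int} (h : pvVis vis v = false) :
    pvFree (pvMark vis v) < pvFree vis := by
  have := pvFree_mark_eq h; omega

-- literal port of A's recursive dfs (the subtype carries the monotonicity facts the
-- termination argument needs; the computed value is exactly (count, visited))
mutual
def pvDfsA (g : PySem.Dict Int (PySem.Set Int)) (vis : List Bool) (u : Int) :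
    {p : Int × List Bool // pvFree p.2 ≤ pvFree (pvMark vis u) ∧ p.2.length = vis.length} :=
  let r := pvGoA g (pvNbrs g u) 1 (pvMark vis u)
  ⟨r.1, r.2.1, r.2.2.trans (pvMark_length vis u)⟩
  termination_by (pvFree (pvMark vis u), (pvNbrs g u).length + 1)
  decreasing_by
    simp_wf
    exact Prod.Lex.right _ (by omega)

def pvGoA (g : PySem.Dict Int (PySem.Set Int)) (l : List Int) (acc : Int) (vis : List Bool) :
    {p : Int × List Bool // pvFree p.2 ≤ pvFree vis ∧ p.2.length = vis.length} :=
  match l with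
  | [] => ⟨(acc, vis), le_refl _, rfl⟩
  | v :: vs =>
    if h : pvVis vis v = false then
      let r := pvDfsA g vis v
      let r2 := pvGoA g vs (acc + r.1.1) r.1.2
      ⟨r2.1, le_trans r2.2.1 (le_trans r.2.1 (pvFree_mark_le vis v)), r2.2.2.trans r.2.2⟩
    else pvGoA g vs acc vis
  termination_by (pvFree vis, l.length)
  decreasing_by
    · simp_wf
      exact Prod.Lex.left _ _ (pvFree_mark_lt h)
    · simp_wf
      exact Prod.Lex.left _ _ (lt_of_le_of_lt r.2.1 (pvFree_mark_lt h))
    · simp_wf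
      exact Prod.Lex.right _ (by omega)
end

def getMaxNewEdges (g_nodes : Int) (g_from : List Int) (g_to : List Int) (disconnected_nodes : List Int) : Int :=
  let graph := pvGraph g_from g_to
  let n := g_nodes
  let s := disconnected_nodes.foldl
    (fun (st : List Int × List Bool) ele =>
      let r := pvDfsA graph st.2 (ele - 1)
      (st.1 ++ [r.1.1], r.1.2))
    ([], List.replicate n.toNat false)
  let poss := s.1
  let left := n - poss.sum
  let ans := (PySem.List.max? (poss.map (fun ele => ele * left)) id).getD 0
  ((PySem.List.pyRange 0 n 1).foldl
    (fun (st : Int × List Bool) i =>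
      if pvVis st.2 i = false then
        let r := pvDfsA graph st.2 i
        (st.1 - (r.1.1 - 1), r.1.2)
      else st)
    (ans, s.2)).1

-- ===== PORT B =====
-- literal port of B's explore: the inner 'for v in graph[x]' body over (stack, count, visited)
def pvInner (l : List Int) (s : List Int) (c : Int) (vis : List Bool) :
    List Int × Int × List Bool :=
  l.foldl
    (fun (st : List Int × Int × List Bool) v =>
      if pvVis st.2.2 v = false then (v :: st.1, st.2.1 + 1, pvMark st.2.2 v) else st)
    (s, c, vis)

lemma pvInner_cons (v : Int) (vs : List Int) (s : List Int) (c : Int) (vis : List Bool) :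
    pvInner (v :: vs) s c vis =
      if pvVis vis v = false then pvInner vs (v :: s) (c + 1) (pvMark vis v)
      else pvInner vs s c vis := by
  simp only [pvInner, List.foldl_cons]
  split_ifs with h <;> rfl

lemma pvInner_free_le (l : List Int) (s : List Int) (c : Int) (vis : List Bool) :
    pvFree (pvInner l s c vis).2.2 ≤ pvFree vis := by
  induction l generalizing s c vis with
  | nil => exact le_refl _
  | cons v vs ih =>
    rw [pvInner_cons]
    split_ifs with h
    · exact le_trans (ih _ _ _) (pvFree_mark_le vis v)
    · exact ih _ _ _

lemma pvInner_id_or_lt (l : List Int) (s : List Int) (c : Int) (vis : List Bool) :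
    (∀ v ∈ l, pvVis vis v = true) ∨ pvFree (pvInner l s c vis).2.2 < pvFree vis := by
  induction l generalizing s c vis with
  | nil => exact Or.inl (by simp)
  | cons v vs ih =>
    by_cases h : pvVis vis v = false
    · refine Or.inr ?_
      rw [pvInner_cons, if_pos h]
      exact lt_of_le_of_lt (pvInner_free_le _ _ _ _) (pvFree_mark_lt h)
    · have hv : pvVis vis v = true := by
        cases hc : pvVis vis v with
        | true => rfl
        | false => exact absurd hc h
      rw [pvInner_cons, if_neg h]
      rcases ih s c vis with h2 | h2
      · refine Or.inl ?_
        intro w hw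
        rcases List.mem_cons.mp hw with rfl | hw'
        · exact hv
        · exact h2 w hw'
      · exact Or.inr h2

lemma pvInner_of_all_visited (l : List Int) (s : List Int) (c : Int) (vis : List Bool)
    (h : ∀ v ∈ l, pvVis vis v = true) : pvInner l s c vis = (s, c, vis) := by
  induction l with
  | nil => rfl
  | cons v vs ih =>
    rw [pvInner_cons, if_neg (by simp [h v List.mem_cons_self])]
    exact ih (fun w hw => h w (List.mem_cons_of_mem v hw))

-- literal port of B's 'while stack' loop
def pvLoopB (g : PySem.Dict Int (PySem.Set Int)) (st : List Int) (cnt : Int) (vis : List Bool) :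
    Int × List Bool :=
  match st with
  | [] => (cnt, vis)
  | x :: rest =>
    let r := pvInner (pvNbrs g x) rest cnt vis
    pvLoopB g r.1 r.2.1 r.2.2
  termination_by (pvFree vis, st.length)
  decreasing_by
    rcases pvInner_id_or_lt (pvNbrs g x) rest cnt vis with h | h
    · rw [pvInner_of_all_visited _ _ _ _ h]
      exact Prod.Lex.right _ (by simp)
    · exact Prod.Lex.left _ _ h

def pvExploreB (g : PySem.Dict Int (PySem.Set Int)) (vis : List Bool) (u : Int) :
    Int × List Bool :=
  pvLoopB g [u] 1 (pvMark vis u)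

def getMaxNewEdges_alt (g_nodes : Int) (g_from : List Int) (g_to : List Int) (disconnected_nodes : List Int) : Int :=
  let graph := pvGraph g_from g_to
  let n := g_nodes
  let s := disconnected_nodes.foldl
    (fun (st : List Int × List Bool) ele =>
      let r := pvExploreB graph st.2 (ele - 1)
      (st.1 ++ [r.1], r.2))
    ([], List.replicate n.toNat false)
  let poss := s.1
  let left := n - poss.sum
  let ans := (PySem.List.max? (poss.map (fun ele => ele * left)) id).getD 0
  ((PySem.List.pyRange 0 n 1).foldl
    (fun (st : Int × List Bool) i =>
      if pvVis st.2 i = false then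
        let r := pvExploreB graph st.2 i
        (st.1 - (r.1 - 1), r.2)
      else st)
    (ans, s.2)).1

-- ===== PRECONDITION & SPEC =====
-- the node labels a run of the function actually uses
def pvUsed (g_from : List Int) (g_to : List Int) (disconnected_nodes : List Int) : List Int :=
  (g_from.zip g_to).flatMap (fun p => [p.1, p.2]) ++ disconnected_nodes

-- label in the valid index window [1-n, n]
def pvInR (g_nodes : Int) (x : Int) : Prop := 1 - g_nodes ≤ x ∧ x ≤ g_nodes

-- an in-window label whose visited[]-slot is never read through its own graph key:
-- not a disconnected label, and every edge partner is outside the window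
def pvInert (g_nodes : Int) (g_from : List Int) (g_to : List Int)
    (disconnected_nodes : List Int) (c : Int) : Prop :=
  c ∉ disconnected_nodes ∧
  ∀ q ∈ g_from.zip g_to,
    (q.1 = c → ¬ pvInR g_nodes q.2) ∧ (q.2 = c → ¬ pvInR g_nodes q.1)

-- an "edged" label: inside the window and joined by an edge to another in-window label
def pvEdged (g_nodes : Int) (g_from : List Int) (g_to : List Int) (x : Int) : Prop :=
  pvInR g_nodes x ∧
    ∃ q ∈ g_from.zip g_to, (q.1 = x ∧ pvInR g_nodes q.2) ∨ (q.2 = x ∧ pvInR g_nodes q.1)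

-- Pre_ restricts to the inputs on which Python A returns normally, minus slot-alias
-- collisions: at least one disconnected node (max() raises ValueError on an empty
-- sequence); every disconnected label in the index window [1-n, n] (labels ≤ 0 index
-- visited[] from the end, Python's negative-index semantics, which both programs share);
-- every edge pair fully inside the window, fully outside it, or outside-inside with the
-- inside endpoint ≤ 0 and inert (in all these cases the traversal never reads an
-- out-of-window slot, so A returns; any other pair raises IndexError); and no two used
-- EDGED labels x, x+n (they alias one visited[]-slot under different graph keys, where
-- the result depends on the traversal order, so A and B may legitimately differ; cited).
def Pre_getMaxNewEdges (g_nodes : Int) (g_from : List Int) (g_to : List Int) (disconnected_nodes : List Int) : Prop :=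
  disconnected_nodes ≠ [] ∧
  (∀ p ∈ g_from.zip g_to,
    (pvInR g_nodes p.1 ∧ pvInR g_nodes p.2) ∨
    (¬ pvInR g_nodes p.1 ∧ ¬ pvInR g_nodes p.2) ∨
    (¬ pvInR g_nodes p.1 ∧ pvInR g_nodes p.2 ∧ p.2 ≤ 0 ∧
      pvInert g_nodes g_from g_to disconnected_nodes p.2) ∨
    (¬ pvInR g_nodes p.2 ∧ pvInR g_nodes p.1 ∧ p.1 ≤ 0 ∧
      pvInert g_nodes g_from g_to disconnected_nodes p.1)) ∧
  (∀ d ∈ disconnected_nodes, 1 - g_nodes ≤ d ∧ d ≤ g_nodes) ∧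
  (∀ x ∈ pvUsed g_from g_to disconnected_nodes,
    ∀ y ∈ pvUsed g_from g_to disconnected_nodes,
    pvEdged g_nodes g_from g_to x → pvEdged g_nodes g_from g_to y → y ≠ x + g_nodes)
instance (g_nodes : Int) (g_from : List Int) (g_to : List Int) (disconnected_nodes : List Int) : Decidable (Pre_getMaxNewEdges g_nodes g_from g_to disconnected_nodes) := by
  unfold Pre_getMaxNewEdges
  refine @instDecidableAnd _ _ ?_ (@instDecidableAnd _ _ ?_ (@instDecidableAnd _ _ ?_ ?_)) <;>
    first
      | (unfold pvEdged pvInR; infer_instance)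
      | (unfold pvInert pvInR; infer_instance)
      | infer_instance

def pvWitness_getMaxNewEdges : Int × List Int × List Int × List Int := (3, [1], [2], [3])

def Spec_getMaxNewEdges (g_nodes : Int) (g_from : List Int) (g_to : List Int) (disconnected_nodes : List Int) (out : Int) : Prop := out = getMaxNewEdges_alt g_nodes g_from g_to disconnected_nodes
instance (g_nodes : Int) (g_from : List Int) (g_to : List Int) (disconnected_nodes : List Int) (out : Int) : Decidable (Spec_getMaxNewEdges g_nodes g_from g_to disconnected_nodes out) := by unfold Spec_getMaxNewEdges; infer_instance

-- ===== CLAIM (what is proved, stated in full; the proofs are below) =====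
def Claim_equal_getMaxNewEdges : Prop := ∀ (g_nodes : Int) (g_from : List Int) (g_to : List Int) (disconnected_nodes : List Int), Dom_getMaxNewEdges g_nodes g_from g_to disconnected_nodes → Pre_getMaxNewEdges g_nodes g_from g_to disconnected_nodes → Spec_getMaxNewEdges g_nodes g_from g_to disconnected_nodes (getMaxNewEdges g_nodes g_from g_to disconnected_nodes)

-- ===== LEMMAS AND PROOFS =====


-- step relation / reachability in the adjacency dict, avoiding already-visited targets
def pvStep (g : PySem.Dict Int (PySem.Set Int)) (vis : List Bool) (a b : Int) : Prop :=
  b ∈ pvNbrs g a ∧ pvVis vis b = false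

def pvReach (g : PySem.Dict Int (PySem.Set Int)) (vis : List Bool) (u v : Int) : Prop :=
  Relation.ReflTransGen (pvStep g vis) u v

-- Lab is the set of "labelled" nodes: graph keys and values and dfs start labels
def pvAdjOK (g : PySem.Dict Int (PySem.Set Int)) (L : Nat) (Lab : Int → Prop) : Prop :=
  ∀ a b : Int, Lab a → b ∈ pvNbrs g a → (PySem.List.pyIdx? L b).isSome = true → Lab b

-- no two labelled nodes share a visited[]-slot (the no-alias part of Pre_)
def pvInj (L : Nat) (Lab : Int → Prop) : Prop :=
  ∀ a b : Int, Lab a → Lab b → (PySem.List.pyIdx? L a).isSome = true →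
    PySem.List.pyIdx? L a = PySem.List.pyIdx? L b → a = b

-- slot-level characterizations of the visited array produced by a traversal
def pvChrA (g : PySem.Dict Int (PySem.Set Int)) (L : Nat) (vis : List Bool) (u : Int)
    (res : List Bool) : Prop :=
  ∀ j : Nat, j < L → (res.getD j true = true ↔ (vis.getD j true = true ∨
    ∃ i : Int, PySem.List.pyIdx? L i = some j ∧ pvReach g vis u i))

def pvChrL (g : PySem.Dict Int (PySem.Set Int)) (L : Nat) (vis : List Bool) (ws : List Int)
    (res : List Bool) : Prop :=
  ∀ j : Nat, j < L → (res.getD j true = true ↔ (vis.getD j true = true ∨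
    ∃ w ∈ ws, pvVis vis w = false ∧
      ∃ i : Int, PySem.List.pyIdx? L i = some j ∧ pvReach g vis w i))

-- basic pvVis / pvMark facts
lemma pvIdx_lt {n : Nat} {i : Int} {k : Nat} (h : PySem.List.pyIdx? n i = some k) : k < n := by
  unfold PySem.List.pyIdx? at h
  split_ifs at h with h1 h2 h3 <;> simp_all <;> omega

lemma pvMark_none {vis : List Bool} {v : Int} (hk : PySem.List.pyIdx? vis.length v = none) :
    pvMark vis v = vis := by
  unfold pvMark PySem.List.pySetD PySem.List.pySet?; rw [hk]; rfl

lemma pvVis_idx {vis : List Bool} {v : Int} {k : Nat}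
    (hk : PySem.List.pyIdx? vis.length v = some k) : pvVis vis v = (vis[k]?).getD true := by
  unfold pvVis PySem.List.pyGetD PySem.List.pyGet?; rw [hk]; rfl

lemma pvVis_none {vis : List Bool} {v : Int}
    (hk : PySem.List.pyIdx? vis.length v = none) : pvVis vis v = true := by
  unfold pvVis PySem.List.pyGetD PySem.List.pyGet?; rw [hk]; rfl

lemma pvVis_set (vis : List Bool) (k : Nat) (hk : k < vis.length) (b : Int) :
    pvVis (vis.set k true) b =
      (pvVis vis b || decide (PySem.List.pyIdx? vis.length b = some k)) := by
  cases hb : PySem.List.pyIdx? vis.length b with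
  | none =>
    have hb' : PySem.List.pyIdx? (vis.set k true).length b = none := by
      rwa [List.length_set]
    rw [pvVis_none hb', pvVis_none hb]
    simp [hb]
  | some kb =>
    have hb' : PySem.List.pyIdx? (vis.set k true).length b = some kb := by
      rwa [List.length_set]
    rw [pvVis_idx hb', pvVis_idx hb]
    have hkb : kb < vis.length := pvIdx_lt hb
    by_cases he : k = kb
    · subst he
      rw [List.getElem?_set_self hk]
      simp [hb]
    · rw [List.getElem?_set_ne (by omega)]
      simp [Ne.symm he]

lemma pvVis_mark_mono {vis : List Bool} (x b : Int) (h : pvVis vis b = true) :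
    pvVis (pvMark vis x) b = true := by
  cases hk : PySem.List.pyIdx? vis.length x with
  | none => rw [pvMark_none hk]; exact h
  | some k => rw [pvMark_of_idx hk, pvVis_set vis k (pvIdx_lt hk), h]; rfl

lemma pvMark_of_vis {vis : List Bool} {x : Int} (h : pvVis vis x = true) :
    pvMark vis x = vis := by
  cases hk : PySem.List.pyIdx? vis.length x with
  | none => exact pvMark_none hk
  | some k =>
    rw [pvMark_of_idx hk]
    have hlt : k < vis.length := pvIdx_lt hk
    rw [pvVis_idx hk] at h
    rw [List.getElem?_eq_getElem hlt] at h
    simp at h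
    conv_lhs => rw [← h]
    exact List.set_getElem_self hlt

lemma pvVis_pos_free {vis : List Bool} {v : Int} (h : pvVis vis v = false) : 0 < pvFree vis := by
  obtain ⟨k, _, hlt, hx⟩ := pvVis_false_elim h
  unfold pvFree
  have : false ∈ vis := by
    have := List.getElem_mem hlt
    rwa [hx] at this
  exact List.count_pos_iff.mpr this

-- slot bridges
lemma pvVis_slot {vis : List Bool} {v : Int} {k : Nat}
    (hk : PySem.List.pyIdx? vis.length v = some k) : pvVis vis v = vis.getD k true := by
  rw [pvVis_idx hk, List.getD_eq_getElem?_getD]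

lemma pvMark_slot {vis : List Bool} {x : Int} {kx : Nat}
    (hk : PySem.List.pyIdx? vis.length x = some kx) (j : Nat) :
    (pvMark vis x).getD j true = (vis.getD j true || decide (j = kx)) := by
  rw [pvMark_of_idx hk]
  have hkx := pvIdx_lt hk
  by_cases hj : j = kx
  · subst hj
    rw [List.getD_eq_getElem?_getD, List.getElem?_set_self hkx]
    simp
  · rw [List.getD_eq_getElem?_getD, List.getElem?_set_ne (fun h => hj h.symm),
      ← List.getD_eq_getElem?_getD]
    simp [hj]

lemma pvVis_false_slot {vis : List Bool} {v : Int} (h : pvVis vis v = false) :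
    ∃ k, PySem.List.pyIdx? vis.length v = some k ∧ k < vis.length ∧ vis.getD k true = false := by
  obtain ⟨k, hk, hlt, hx⟩ := pvVis_false_elim h
  refine ⟨k, hk, hlt, ?_⟩
  rw [List.getD_eq_getElem?_getD, List.getElem?_eq_getElem hlt]
  simp [hx]

lemma pvMono_of_slots {L : Nat} {vis vis' : List Bool} (h1 : vis.length = L)
    (h2 : vis'.length = L)
    (h : ∀ j, j < L → vis.getD j true = true → vis'.getD j true = true) :
    ∀ b : Int, pvVis vis b = true → pvVis vis' b = true := by
  intro b hb
  cases hk : PySem.List.pyIdx? vis'.length b with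
  | none => exact pvVis_none hk
  | some k =>
    have hk' : PySem.List.pyIdx? vis.length b = some k := by rw [h1, ← h2]; exact hk
    rw [pvVis_slot hk]
    rw [pvVis_slot hk'] at hb
    exact h k (by have := pvIdx_lt hk; omega) hb

lemma pvIdx_isSome_iff (L : Nat) (i : Int) :
    (PySem.List.pyIdx? L i).isSome = true ↔ (-(L : Int) ≤ i ∧ i < (L : Int)) := by
  unfold PySem.List.pyIdx?
  split_ifs <;> simp <;> omega

lemma pvVis_false_isSome {L : Nat} {vis : List Bool} (hlen : vis.length = L) {v : Int}
    (h : pvVis vis v = false) : (PySem.List.pyIdx? L v).isSome = true := by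
  obtain ⟨k, hk, _, _⟩ := pvVis_false_elim h
  rw [← hlen, hk]
  rfl

-- reachability helpers
lemma pvReach_target {g : PySem.Dict Int (PySem.Set Int)} {L : Nat} {Lab : Int → Prop}
    (hadj : pvAdjOK g L Lab) {vis : List Bool} (hlen : vis.length = L) {w v : Int}
    (hw : Lab w) (hr : pvReach g vis w v) :
    v = w ∨ (Lab v ∧ pvVis vis v = false) := by
  induction hr with
  | refl => exact Or.inl rfl
  | @tail y x _ hstep ih =>
    have hyLab : Lab y := by
      rcases ih with rfl | hh
      · exact hw
      · exact hh.1
    exact Or.inr ⟨hadj y x hyLab hstep.1 (pvVis_false_isSome hlen hstep.2), hstep.2⟩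

lemma pvReach_anti {g : PySem.Dict Int (PySem.Set Int)} {vis vis2 : List Bool}
    (h : ∀ b : Int, pvVis vis b = true → pvVis vis2 b = true)
    {w v : Int} (hr : pvReach g vis2 w v) : pvReach g vis w v := by
  induction hr with
  | refl => exact Relation.ReflTransGen.refl
  | tail _ hstep ih =>
    refine Relation.ReflTransGen.tail ih ⟨hstep.1, ?_⟩
    cases hc : pvVis vis _ with
    | false => rfl
    | true => exact absurd (h _ hc) (by simp [hstep.2])

-- absorption: a reach-set avoiding vis, read through a visited-superset vis'
lemma pvAbsorb {g : PySem.Dict Int (PySem.Set Int)} {L : Nat} {Lab : Int → Prop}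
    (hadj : pvAdjOK g L Lab) (hinj : pvInj L Lab) {vis vis' : List Bool}
    (hlen : vis.length = L) (hlen' : vis'.length = L) (R0 : Int → Prop)
    (hR0step : ∀ x y, R0 x → pvStep g vis x y → R0 y)
    (hR0lab : ∀ i, R0 i → Lab i)
    (hsub : ∀ j, j < L → vis'.getD j true = true →
      vis.getD j true = true ∨ ∃ i : Int, PySem.List.pyIdx? L i = some j ∧ R0 i)
    (hR0in : ∀ i, R0 i → pvVis vis' i = true)
    {w v : Int} (hwLab : Lab w) (hwf : pvVis vis w = false) (hr : pvReach g vis w v) :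
    pvVis vis' v = true ∨ pvReach g vis' w v := by
  induction hr with
  | refl => exact Or.inr Relation.ReflTransGen.refl
  | @tail y x hwy hstep ih =>
    have hy : Lab y ∧ pvVis vis y = false := by
      rcases pvReach_target hadj hlen hwLab hwy with h | h
      · exact h ▸ ⟨hwLab, hwf⟩
      · exact h
    rcases ih with hvy | hRy
    · obtain ⟨ky, hky, hkyL, hkyf⟩ := pvVis_false_slot hy.2
      have hky' : PySem.List.pyIdx? vis'.length y = some ky := by rw [hlen', ← hlen]; exact hky
      rw [pvVis_slot hky'] at hvy
      rcases hsub ky (by omega) hvy with hvk | ⟨i, hidx, hR0⟩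
      · rw [hvk] at hkyf; cases hkyf
      · have hkyL2 : PySem.List.pyIdx? L y = some ky := by rw [← hlen]; exact hky
        have : i = y := hinj i y (hR0lab i hR0) hy.1 (by rw [hidx]; rfl)
          (by rw [hidx, hkyL2])
        subst this
        exact Or.inl (hR0in x (hR0step i x hR0 hstep))
    · cases hx : pvVis vis' x with
      | true => exact Or.inl rfl
      | false => exact Or.inr (Relation.ReflTransGen.tail hRy ⟨hstep.1, hx⟩)

-- absorption across marking a single labelled node x
lemma pvAbsorbMark {g : PySem.Dict Int (PySem.Set Int)} {L : Nat} {Lab : Int → Prop}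
    (hadj : pvAdjOK g L Lab) (hinj : pvInj L Lab) {vis : List Bool} (hlen : vis.length = L)
    {x : Int} {kx : Nat} (hxLab : Lab x) (hxk : PySem.List.pyIdx? vis.length x = some kx)
    {w v : Int} (hwLab : Lab w) (hwf : pvVis vis w = false) (hr : pvReach g vis w v) :
    pvVis (pvMark vis x) v = true ∨
    ∃ w', (w' = w ∨ w' ∈ pvNbrs g x) ∧ pvVis (pvMark vis x) w' = false ∧
      pvReach g (pvMark vis x) w' v := by
  induction hr with
  | refl =>
    cases hv : pvVis (pvMark vis x) w with
    | true => exact Or.inl rfl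
    | false => exact Or.inr ⟨w, Or.inl rfl, hv, Relation.ReflTransGen.refl⟩
  | @tail y z hwy hstep ih =>
    have hy : Lab y ∧ pvVis vis y = false := by
      rcases pvReach_target hadj hlen hwLab hwy with h | h
      · exact h ▸ ⟨hwLab, hwf⟩
      · exact h
    rcases ih with hv | ⟨w', hw'm, hw'f, hw'r⟩
    · obtain ⟨ky, hky, hkyL, hkyf⟩ := pvVis_false_slot hy.2
      have hky' : PySem.List.pyIdx? (pvMark vis x).length y = some ky := by
        rw [pvMark_length]; exact hky
      rw [pvVis_slot hky', pvMark_slot hxk, hkyf] at hv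
      have hkk : ky = kx := by simpa using hv
      have hyx : y = x := by
        have hkyL2 : PySem.List.pyIdx? L y = some ky := by rw [← hlen]; exact hky
        have hxkL2 : PySem.List.pyIdx? L x = some kx := by rw [← hlen]; exact hxk
        refine hinj y x hy.1 hxLab (by rw [hkyL2]; rfl) ?_
        rw [hkyL2, hxkL2, hkk]
      subst hyx
      cases hvz : pvVis (pvMark vis y) z with
      | true => exact Or.inl rfl
      | false => exact Or.inr ⟨z, Or.inr hstep.1, hvz, Relation.ReflTransGen.refl⟩
    · cases hvz : pvVis (pvMark vis x) z with
      | true => exact Or.inl rfl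
      | false =>
        exact Or.inr ⟨w', hw'm, hw'f, Relation.ReflTransGen.tail hw'r ⟨hstep.1, hvz⟩⟩

-- when every element of the list is already visited, A's neighbour loop is the identity
lemma pvGoA_all_visited (g : PySem.Dict Int (PySem.Set Int)) :
    ∀ (l : List Int) (acc : Int) (vis : List Bool),
      (∀ w ∈ l, pvVis vis w = true) → (pvGoA g l acc vis).1 = (acc, vis) := by
  intro l
  induction l with
  | nil => intro acc vis _; rw [pvGoA]
  | cons v vs ih =>
    intro acc vis h
    rw [pvGoA]
    have hv : ¬ pvVis vis v = false := by simp [h v (by simp)]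
    simp only [hv, dite_false]
    exact ih acc vis (fun w hw => h w (by simp [hw]))

-- graph lemmas: neighbour values and keys come from the edge list
lemma pvNbrs_insert (g : PySem.Dict Int (PySem.Set Int)) (k : Int) (s : PySem.Set Int) (a : Int) :
    pvNbrs (g.insert k s) a = if a = k then s else pvNbrs g a := by
  unfold pvNbrs
  rw [PySem.Dict.getD_insert]

lemma pvStep_mem (g : PySem.Dict Int (PySem.Set Int)) (p : Int × Int) (a b : Int)
    (hb : b ∈ pvNbrs
      ((g.insert (p.1 - 1) (PySem.Set.add (g.getD (p.1 - 1) PySem.Set.empty) (p.2 - 1))).insert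
        (p.2 - 1)
        (PySem.Set.add
          ((g.insert (p.1 - 1)
            (PySem.Set.add (g.getD (p.1 - 1) PySem.Set.empty) (p.2 - 1))).getD
              (p.2 - 1) PySem.Set.empty) (p.1 - 1))) a) :
    b ∈ pvNbrs g a ∨ (a = p.1 - 1 ∧ b = p.2 - 1) ∨ (a = p.2 - 1 ∧ b = p.1 - 1) := by
  rw [pvNbrs_insert] at hb
  by_cases h2 : a = p.2 - 1
  · rw [if_pos h2, PySem.Set.mem_add] at hb
    rcases hb with hb | hb
    · have : (g.insert (p.1 - 1)
          (PySem.Set.add (g.getD (p.1 - 1) PySem.Set.empty) (p.2 - 1))).getD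
            (p.2 - 1) PySem.Set.empty = pvNbrs (g.insert (p.1 - 1)
          (PySem.Set.add (g.getD (p.1 - 1) PySem.Set.empty) (p.2 - 1))) (p.2 - 1) := rfl
      rw [this, pvNbrs_insert] at hb
      by_cases h21 : p.2 - 1 = p.1 - 1
      · rw [if_pos h21, PySem.Set.mem_add] at hb
        rcases hb with hb | hb
        · left; rwa [h2, h21]
        · right; left; exact ⟨by omega, hb⟩
      · rw [if_neg h21] at hb
        left; rwa [h2]
    · right; right; exact ⟨h2, hb⟩
  · rw [if_neg h2, pvNbrs_insert] at hb
    by_cases h1 : a = p.1 - 1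
    · rw [if_pos h1, PySem.Set.mem_add] at hb
      rcases hb with hb | hb
      · left; rwa [h1]
      · right; left; exact ⟨h1, hb⟩
    · rw [if_neg h1] at hb
      left; exact hb

lemma pvGraph_mem_aux (ps : List (Int × Int)) :
    ∀ (g0 : PySem.Dict Int (PySem.Set Int)) (a b : Int),
      b ∈ pvNbrs (ps.foldl
        (fun g p =>
          let g1 := g.insert (p.1 - 1) (PySem.Set.add (g.getD (p.1 - 1) PySem.Set.empty) (p.2 - 1))
          g1.insert (p.2 - 1) (PySem.Set.add (g1.getD (p.2 - 1) PySem.Set.empty) (p.1 - 1))) g0) a →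
      b ∈ pvNbrs g0 a ∨ ∃ p ∈ ps, (a = p.1 - 1 ∧ b = p.2 - 1) ∨ (a = p.2 - 1 ∧ b = p.1 - 1) := by
  induction ps with
  | nil => intro g0 a b hb; exact Or.inl hb
  | cons q ps ih =>
    intro g0 a b hb
    rcases ih _ a b hb with h | ⟨p, hp, hv⟩
    · rcases pvStep_mem g0 q a b h with h' | h'
      · exact Or.inl h'
      · exact Or.inr ⟨q, List.mem_cons_self, h'⟩
    · exact Or.inr ⟨p, List.mem_cons_of_mem q hp, hv⟩

lemma pvNbrs_empty (a : Int) : pvNbrs PySem.Dict.empty a = [] := by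
  unfold pvNbrs
  rw [PySem.Dict.getD_empty]
  rfl


-- the main characterization of A's recursive dfs
lemma pvMainA (g : PySem.Dict Int (PySem.Set Int)) (L : Nat) (Lab : Int → Prop)
    (hadj : pvAdjOK g L Lab) (hinj : pvInj L Lab) :
    ∀ k : Nat,
    (∀ vis u, vis.length = L → pvFree vis ≤ k → Lab u → pvVis vis u = false →
      (pvDfsA g vis u).1.2.length = L ∧ pvChrA g L vis u (pvDfsA g vis u).1.2 ∧
      (pvDfsA g vis u).1.1 = (pvFree vis : Int) - (pvFree (pvDfsA g vis u).1.2 : Int)) ∧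
    (∀ vis l acc, vis.length = L → pvFree vis ≤ k →
      (∀ w ∈ l, (PySem.List.pyIdx? L w).isSome = true → Lab w) →
      (pvGoA g l acc vis).1.2.length = L ∧ pvChrL g L vis l (pvGoA g l acc vis).1.2 ∧
      (pvGoA g l acc vis).1.1 = acc + (pvFree vis : Int) - (pvFree (pvGoA g l acc vis).1.2 : Int)) := by
  intro k
  induction k with
  | zero =>
    constructor
    · intro vis u _ hk _ huf
      exact absurd hk (by have := pvVis_pos_free huf; omega)
    · intro vis l acc hlen hk _
      have hall : ∀ w ∈ l, pvVis vis w = true := by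
        intro w hw
        cases hc : pvVis vis w with
        | true => rfl
        | false => exact absurd hk (by have := pvVis_pos_free hc; omega)
      rw [pvGoA_all_visited g l acc vis hall]
      refine ⟨hlen, ?_, by push_cast; ring⟩
      intro j hj
      simp only [iff_self_or]
      rintro ⟨w, hwm, hwf, _⟩
      rw [hall w hwm] at hwf; cases hwf
  | succ k ih =>
    have dfsPart : ∀ vis u, vis.length = L → pvFree vis ≤ k + 1 → Lab u → pvVis vis u = false →
        (pvDfsA g vis u).1.2.length = L ∧ pvChrA g L vis u (pvDfsA g vis u).1.2 ∧
        (pvDfsA g vis u).1.1 = (pvFree vis : Int) - (pvFree (pvDfsA g vis u).1.2 : Int) := by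
      intro vis u hlen hk hLab huf
      obtain ⟨ku, hku, hkuL, hkuf⟩ := pvVis_false_slot huf
      have hkuLidx : PySem.List.pyIdx? L u = some ku := by rw [← hlen]; exact hku
      have hfree1 := pvFree_mark_eq huf
      have hlen1 : (pvMark vis u).length = L := (pvMark_length vis u).trans hlen
      obtain ⟨hglen, hgchr, hgcnt⟩ :=
        ih.2 (pvMark vis u) (pvNbrs g u) 1 hlen1 (by omega) (fun w hw hs => hadj u w hLab hw hs)
      have hd : (pvDfsA g vis u).1 = (pvGoA g (pvNbrs g u) 1 (pvMark vis u)).1 := by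
        rw [pvDfsA]
      refine ⟨by rw [hd]; exact hglen, ?_, by rw [hd, hgcnt]; omega⟩
      intro j hj
      rw [hd, hgchr j hj]
      constructor
      · rintro (h1 | ⟨w, hwm, hwf1, i, hidx, hri⟩)
        · rw [pvMark_slot hku j] at h1
          rcases Bool.or_eq_true_iff.mp h1 with h | h
          · exact Or.inl h
          · refine Or.inr ⟨u, ?_, Relation.ReflTransGen.refl⟩
            rw [of_decide_eq_true h]
            exact hkuLidx
        · have hwvf : pvVis vis w = false := by
            cases hc : pvVis vis w with
            | false => rfl
            | true => rw [pvVis_mark_mono u w hc] at hwf1; cases hwf1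
          refine Or.inr ⟨i, hidx, ?_⟩
          exact Relation.ReflTransGen.head ⟨hwm, hwvf⟩
            (pvReach_anti (fun b hb => pvVis_mark_mono u b hb) hri)
      · rintro (h1 | ⟨i, hidx, hri⟩)
        · left
          rw [pvMark_slot hku j, h1]
          rfl
        · rcases pvAbsorbMark hadj hinj hlen hLab hku hLab huf hri with
            hv1 | ⟨w', hw'm, hw'f, hw'r⟩
          · left
            have hidx' : PySem.List.pyIdx? (pvMark vis u).length i = some j := by
              rw [hlen1]; exact hidx
            rw [← pvVis_slot hidx']
            exact hv1
          · rcases hw'm with rfl | hmem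
            · exfalso
              have hidxw : PySem.List.pyIdx? (pvMark vis w').length w' = some ku := by
                rw [pvMark_length]; exact hku
              rw [pvVis_slot hidxw, pvMark_slot hku] at hw'f
              simp at hw'f
            · exact Or.inr ⟨w', hmem, hw'f, i, hidx, hw'r⟩
    refine ⟨dfsPart, ?_⟩
    intro vis l
    induction l generalizing vis with
    | nil =>
      intro acc hlen hk _
      rw [pvGoA]
      refine ⟨hlen, ?_, by push_cast; ring⟩
      intro j hj
      simp
    | cons v vs ihl =>
      intro acc hlen hk hl
      have hlt : ∀ w ∈ vs, (PySem.List.pyIdx? L w).isSome = true → Lab w :=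
        fun w hw => hl w (List.mem_cons_of_mem v hw)
      by_cases hv : pvVis vis v = false
      · have hvLab : Lab v := hl v List.mem_cons_self (pvVis_false_isSome hlen hv)
        have hrw : (pvGoA g (v :: vs) acc vis).1 =
            (pvGoA g vs (acc + (pvDfsA g vis v).1.1) (pvDfsA g vis v).1.2).1 := by
          rw [pvGoA, dif_pos hv]
        obtain ⟨hdlen, hdchr, hdcnt⟩ := dfsPart vis v hlen hk hvLab hv
        have hfr : pvFree (pvDfsA g vis v).1.2 + 1 ≤ pvFree vis := by
          have h1 := (pvDfsA g vis v).2.1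
          have h2 := pvFree_mark_eq hv
          omega
        obtain ⟨hglen, hgchr, hgcnt⟩ :=
          ihl (pvDfsA g vis v).1.2 (acc + (pvDfsA g vis v).1.1) hdlen (by omega) hlt
        have hmono : ∀ b : Int, pvVis vis b = true → pvVis (pvDfsA g vis v).1.2 b = true :=
          pvMono_of_slots hlen hdlen (fun j hj hb => (hdchr j hj).mpr (Or.inl hb))
        have hR0lab : ∀ i, pvReach g vis v i → Lab i := by
          intro i h
          rcases pvReach_target hadj hlen hvLab h with rfl | hh
          · exact hvLab
          · exact hh.1
        have hR0in : ∀ i, pvReach g vis v i → pvVis (pvDfsA g vis v).1.2 i = true := by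
          intro i h
          have hif : pvVis vis i = false := by
            rcases pvReach_target hadj hlen hvLab h with rfl | hh
            · exact hv
            · exact hh.2
          obtain ⟨ki, hki, hkiL, _⟩ := pvVis_false_slot hif
          have hki2 : PySem.List.pyIdx? (pvDfsA g vis v).1.2.length i = some ki := by
            rw [hdlen, ← hlen]; exact hki
          rw [pvVis_slot hki2]
          exact (hdchr ki (by omega)).mpr (Or.inr ⟨i, (by rw [← hlen]; exact hki), h⟩)
        refine ⟨by rw [hrw]; exact hglen, ?_, by rw [hrw, hgcnt, hdcnt]; omega⟩
        intro j hj
        rw [hrw, hgchr j hj]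
        constructor
        · rintro (h1 | ⟨w, hwm, hwf2, i, hidx, hri⟩)
          · rcases (hdchr j hj).mp h1 with h | ⟨i, hidx, hri⟩
            · exact Or.inl h
            · exact Or.inr ⟨v, List.mem_cons_self, hv, i, hidx, hri⟩
          · have hwvf : pvVis vis w = false := by
              cases hc : pvVis vis w with
              | false => rfl
              | true => rw [hmono w hc] at hwf2; cases hwf2
            exact Or.inr ⟨w, List.mem_cons_of_mem v hwm, hwvf, i, hidx,
              pvReach_anti hmono hri⟩
        · rintro (h1 | ⟨w, hwm, hwf2, i, hidx, hri⟩)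
          · exact Or.inl ((hdchr j hj).mpr (Or.inl h1))
          · rcases List.mem_cons.mp hwm with rfl | hwm'
            · exact Or.inl ((hdchr j hj).mpr (Or.inr ⟨i, hidx, hri⟩))
            · have hwLab : Lab w := hlt w hwm' (pvVis_false_isSome hlen hwf2)
              rcases pvAbsorb hadj hinj hlen hdlen (pvReach g vis v)
                  (fun a b hra hst => Relation.ReflTransGen.tail hra hst)
                  hR0lab (fun j0 hj0 ht => (hdchr j0 hj0).mp ht) hR0in
                  hwLab hwf2 hri with hvx | hrx
              · left
                have hidx2 : PySem.List.pyIdx? (pvDfsA g vis v).1.2.length i = some j := by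
                  rw [hdlen]; exact hidx
                rw [← pvVis_slot hidx2]
                exact hvx
              · cases hc : pvVis (pvDfsA g vis v).1.2 w with
                | false => exact Or.inr ⟨w, hwm', hc, i, hidx, hrx⟩
                | true =>
                  obtain ⟨kw, hkw, hkwL, hkwf⟩ := pvVis_false_slot hwf2
                  have hkw2 : PySem.List.pyIdx? (pvDfsA g vis v).1.2.length w = some kw := by
                    rw [hdlen, ← hlen]; exact hkw
                  have hkwL2 : PySem.List.pyIdx? L w = some kw := by rw [← hlen]; exact hkw
                  rw [pvVis_slot hkw2] at hc
                  rcases (hdchr kw (by omega)).mp hc with hck | ⟨i', hidx', hri'⟩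
                  · rw [hck] at hkwf; cases hkwf
                  · have : i' = w := hinj i' w (hR0lab i' hri') hwLab
                      (by rw [hidx']; rfl) (by rw [hidx', hkwL2])
                    subst this
                    left
                    have hidx2 : PySem.List.pyIdx? (pvDfsA g vis v).1.2.length i = some j := by
                      rw [hdlen]; exact hidx
                    rw [← pvVis_slot hidx2]
                    exact hR0in i (Relation.ReflTransGen.trans hri' hri)
      · have hv' : pvVis vis v = true := by
          cases hc : pvVis vis v with
          | true => rfl
          | false => exact absurd hc hv
        have hrw : (pvGoA g (v :: vs) acc vis).1 = (pvGoA g vs acc vis).1 := by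
          rw [pvGoA, dif_neg hv]
        obtain ⟨hglen, hgchr, hgcnt⟩ := ihl vis acc hlen hk hlt
        refine ⟨by rw [hrw]; exact hglen, ?_, by rw [hrw, hgcnt]⟩
        intro j hj
        rw [hrw, hgchr j hj]
        constructor
        · rintro (h1 | ⟨w, hwm, hwf, hrest⟩)
          · exact Or.inl h1
          · exact Or.inr ⟨w, List.mem_cons_of_mem v hwm, hwf, hrest⟩
        · rintro (h1 | ⟨w, hwm, hwf, hrest⟩)
          · exact Or.inl h1
          · rcases List.mem_cons.mp hwm with rfl | hwm'
            · rw [hv'] at hwf; cases hwf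
            · exact Or.inr ⟨w, hwm', hwf, hrest⟩


-- characterization of B's inner neighbour fold
lemma pvInner_length (l : List Int) (s : List Int) (c : Int) (vis : List Bool) :
    (pvInner l s c vis).2.2.length = vis.length := by
  induction l generalizing s c vis with
  | nil => rfl
  | cons v vs ih =>
    rw [pvInner_cons]
    split_ifs with h
    · rw [ih]; exact pvMark_length vis v
    · exact ih s c vis

lemma pvInner_vis_mono (l : List Int) (s : List Int) (c : Int) (vis : List Bool) (b : Int)
    (h : pvVis vis b = true) : pvVis (pvInner l s c vis).2.2 b = true := by
  induction l generalizing s c vis with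
  | nil => exact h
  | cons v vs ih =>
    rw [pvInner_cons]
    split_ifs with hv
    · exact ih _ _ _ (pvVis_mark_mono v b h)
    · exact ih s c vis h

lemma pvInner_slot (l : List Int) (s : List Int) (c : Int) (vis : List Bool) (j : Nat) :
    ((pvInner l s c vis).2.2.getD j true = true ↔ vis.getD j true = true ∨
      ∃ v ∈ l, pvVis vis v = false ∧ PySem.List.pyIdx? vis.length v = some j) := by
  induction l generalizing s c vis with
  | nil => simp [pvInner]
  | cons v vs ih =>
    rw [pvInner_cons]
    split_ifs with hv
    · obtain ⟨kv, hkv, hkvL, hkvf⟩ := pvVis_false_slot hv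
      rw [ih]
      constructor
      · rintro (h1 | ⟨w, hwm, hwf, hidx⟩)
        · rw [pvMark_slot hkv j] at h1
          rcases Bool.or_eq_true_iff.mp h1 with h | h
          · exact Or.inl h
          · exact Or.inr ⟨v, List.mem_cons_self, hv, by rw [of_decide_eq_true h]; exact hkv⟩
        · have hwvf : pvVis vis w = false := by
            cases hc : pvVis vis w with
            | false => rfl
            | true => rw [pvVis_mark_mono v w hc] at hwf; cases hwf
          refine Or.inr ⟨w, List.mem_cons_of_mem v hwm, hwvf, ?_⟩
          rw [← pvMark_length vis v]; exact hidx
      · rintro (h1 | ⟨w, hwm, hwf, hidx⟩)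
        · left; rw [pvMark_slot hkv j, h1]; rfl
        · rcases List.mem_cons.mp hwm with rfl | hwm'
          · left
            rw [pvMark_slot hkv j]
            have hj : kv = j := by rw [hkv] at hidx; exact Option.some.inj hidx
            simp [hj]
          · by_cases hwf2 : pvVis (pvMark vis v) w = false
            · refine Or.inr ⟨w, hwm', hwf2, ?_⟩
              rw [pvMark_length]; exact hidx
            · -- w's slot got marked: that slot is j, and it is covered by the left clause
              left
              have hwt : pvVis (pvMark vis v) w = true := by
                cases hc : pvVis (pvMark vis v) w with
                | true => rfl
                | false => exact absurd hc hwf2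
              have hidx' : PySem.List.pyIdx? (pvMark vis v).length w = some j := by
                rw [pvMark_length]; exact hidx
              rw [pvVis_slot hidx'] at hwt
              exact hwt
    · rw [ih]
      constructor
      · rintro (h1 | ⟨w, hwm, hwf, hidx⟩)
        · exact Or.inl h1
        · exact Or.inr ⟨w, List.mem_cons_of_mem v hwm, hwf, hidx⟩
      · rintro (h1 | ⟨w, hwm, hwf, hidx⟩)
        · exact Or.inl h1
        · rcases List.mem_cons.mp hwm with rfl | hwm'
          · exact absurd hwf hv
          · exact Or.inr ⟨w, hwm', hwf, hidx⟩

lemma pvInner_cnt (l : List Int) (s : List Int) (c : Int) (vis : List Bool) :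
    (pvInner l s c vis).2.1 =
      c + (pvFree vis : Int) - (pvFree (pvInner l s c vis).2.2 : Int) := by
  induction l generalizing s c vis with
  | nil =>
    show c = c + (pvFree vis : Int) - (pvFree vis : Int)
    ring
  | cons v vs ih =>
    rw [pvInner_cons]
    split_ifs with hv
    · rw [ih]
      have := pvFree_mark_eq hv
      omega
    · exact ih s c vis

lemma pvInner_stack_mono (l : List Int) (s : List Int) (c : Int) (vis : List Bool) (y : Int)
    (h : y ∈ s) : y ∈ (pvInner l s c vis).1 := by
  induction l generalizing s c vis with
  | nil => exact h
  | cons v vs ih =>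
    rw [pvInner_cons]
    split_ifs with hv
    · exact ih _ _ _ (List.mem_cons_of_mem v h)
    · exact ih s c vis h

lemma pvInner_stack_sub (l : List Int) (s : List Int) (c : Int) (vis : List Bool) (y : Int)
    (h : y ∈ (pvInner l s c vis).1) : y ∈ s ∨ (y ∈ l ∧ pvVis vis y = false) := by
  induction l generalizing s c vis with
  | nil => exact Or.inl h
  | cons v vs ih =>
    rw [pvInner_cons] at h
    split_ifs at h with hv
    · rcases ih _ _ _ h with h1 | ⟨h1, h2⟩
      · rcases List.mem_cons.mp h1 with rfl | h1'
        · exact Or.inr ⟨List.mem_cons_self, hv⟩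
        · exact Or.inl h1'
      · have : pvVis vis y = false := by
          cases hc : pvVis vis y with
          | false => rfl
          | true => rw [pvVis_mark_mono v y hc] at h2; cases h2
        exact Or.inr ⟨List.mem_cons_of_mem v h1, this⟩
    · rcases ih s c vis h with h1 | ⟨h1, h2⟩
      · exact Or.inl h1
      · exact Or.inr ⟨List.mem_cons_of_mem v h1, h2⟩

lemma pvInner_stack_sup (l : List Int) (s : List Int) (c : Int) (vis : List Bool)
    (hinj' : ∀ v w, v ∈ l → w ∈ l → pvVis vis w = false →
      PySem.List.pyIdx? vis.length v = PySem.List.pyIdx? vis.length w → v = w)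
    (y : Int) (hy : y ∈ l) (hyf : pvVis vis y = false) : y ∈ (pvInner l s c vis).1 := by
  induction l generalizing s c vis with
  | nil => cases hy
  | cons v vs ih =>
    rw [pvInner_cons]
    by_cases hvy : y = v
    · subst hvy
      rw [if_pos hyf]
      exact pvInner_stack_mono _ _ _ _ _ List.mem_cons_self
    · have hy' : y ∈ vs := by
        rcases List.mem_cons.mp hy with h | h
        · exact absurd h.symm (fun h => hvy h.symm)
        · exact h
      split_ifs with hv
      · -- v is marked; y's slot differs from v's, so y stays unvisited
        obtain ⟨kv, hkv, _, _⟩ := pvVis_false_slot hv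
        obtain ⟨ky, hky, hkyL, hkyf⟩ := pvVis_false_slot hyf
        have hkk : ky ≠ kv := by
          intro he
          exact hvy (hinj' y v hy List.mem_cons_self hv (by rw [hky, hkv, he]))
        have hyf2 : pvVis (pvMark vis v) y = false := by
          have hky' : PySem.List.pyIdx? (pvMark vis v).length y = some ky := by
            rw [pvMark_length]; exact hky
          rw [pvVis_slot hky', pvMark_slot hkv, hkyf]
          simp [hkk]
        refine ih _ _ _ ?_ hy' hyf2
        intro a b ha hb hbf heq
        have hbf0 : pvVis vis b = false := by
          cases hc : pvVis vis b with
          | false => rfl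
          | true => rw [pvVis_mark_mono v b hc] at hbf; cases hbf
        refine hinj' a b (List.mem_cons_of_mem v ha) (List.mem_cons_of_mem v hb) hbf0 ?_
        rw [pvMark_length] at heq
        exact heq
      · refine ih s c vis ?_ hy' hyf
        intro a b ha hb hbf heq
        exact hinj' a b (List.mem_cons_of_mem v ha) (List.mem_cons_of_mem v hb) hbf heq

-- absorption across B's inner fold (which marks exactly x's unvisited neighbours)
lemma pvAbsorbFold {g : PySem.Dict Int (PySem.Set Int)} {L : Nat} {Lab : Int → Prop}
    (hadj : pvAdjOK g L Lab) (hinj : pvInj L Lab) {vis vis' : List Bool}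
    (hlen : vis.length = L) (hlen' : vis'.length = L) {x : Int} (hxLab : Lab x)
    (hm : ∀ b : Int, pvVis vis b = true → pvVis vis' b = true)
    (hslots : ∀ j, j < L → (vis'.getD j true = true ↔ vis.getD j true = true ∨
      ∃ v ∈ pvNbrs g x, pvVis vis v = false ∧ PySem.List.pyIdx? L v = some j))
    {w v : Int} (hwLab : Lab w) (hr : pvReach g vis w v) :
    pvVis vis' v = true ∨
    ∃ w', (w' = w ∨ (w' ∈ pvNbrs g x ∧ pvVis vis w' = false)) ∧ pvReach g vis' w' v := by
  induction hr with
  | refl =>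
    cases hv : pvVis vis' w with
    | true => exact Or.inl rfl
    | false => exact Or.inr ⟨w, Or.inl rfl, Relation.ReflTransGen.refl⟩
  | @tail y z hwy hstep ih =>
    cases hz : pvVis vis' z with
    | true => exact Or.inl rfl
    | false =>
      rcases ih with hvy | ⟨w', hw'm, hw'r⟩
      · -- y ended visited in vis'; find an allowed restart point for the step y→z
        have hstep' : pvReach g vis' y z := Relation.ReflTransGen.single ⟨hstep.1, hz⟩
        rcases pvReach_target hadj hlen hwLab hwy with hyw | ⟨hyLab, hyf⟩
        · exact Or.inr ⟨w, Or.inl rfl, hyw ▸ hstep'⟩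
        · obtain ⟨ky, hky, hkyL, hkyf⟩ := pvVis_false_slot hyf
          have hky' : PySem.List.pyIdx? vis'.length y = some ky := by
            rw [hlen', ← hlen]; exact hky
          rw [pvVis_slot hky'] at hvy
          rcases (hslots ky (by omega)).mp hvy with hvk | ⟨v0, hv0m, hv0f, hv0idx⟩
          · rw [hvk] at hkyf; cases hkyf
          · have hv0Lab : Lab v0 := hadj x v0 hxLab hv0m (by rw [hv0idx]; rfl)
            have hkyL2 : PySem.List.pyIdx? L y = some ky := by rw [← hlen]; exact hky
            have : v0 = y := hinj v0 y hv0Lab hyLab (by rw [hv0idx]; rfl)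
              (by rw [hv0idx, hkyL2])
            subst this
            exact Or.inr ⟨v0, Or.inr ⟨hv0m, hv0f⟩, hstep'⟩
      · exact Or.inr ⟨w', hw'm, Relation.ReflTransGen.tail hw'r ⟨hstep.1, hz⟩⟩


-- the main characterization of B's stack loop
lemma pvLoopB_cons (g : PySem.Dict Int (PySem.Set Int)) (x : Int) (rest : List Int)
    (cnt : Int) (vis : List Bool) :
    pvLoopB g (x :: rest) cnt vis =
      pvLoopB g (pvInner (pvNbrs g x) rest cnt vis).1
        (pvInner (pvNbrs g x) rest cnt vis).2.1 (pvInner (pvNbrs g x) rest cnt vis).2.2 := by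
  rw [pvLoopB]

lemma pvMainB (g : PySem.Dict Int (PySem.Set Int)) (L : Nat) (Lab : Int → Prop)
    (hadj : pvAdjOK g L Lab) (hinj : pvInj L Lab) :
    ∀ k : Nat, ∀ vis st cnt, vis.length = L → pvFree vis ≤ k →
      (∀ x ∈ st, Lab x) → (∀ x ∈ st, pvVis vis x = true) →
      (pvLoopB g st cnt vis).2.length = L ∧
      (∀ j, j < L → ((pvLoopB g st cnt vis).2.getD j true = true ↔ vis.getD j true = true ∨
        ∃ w ∈ st, ∃ i : Int, PySem.List.pyIdx? L i = some j ∧ pvReach g vis w i)) ∧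
      (pvLoopB g st cnt vis).1 = cnt + (pvFree vis : Int) - (pvFree (pvLoopB g st cnt vis).2 : Int) := by
  intro k
  induction k with
  | zero =>
    intro vis st
    induction st generalizing vis with
    | nil =>
      intro cnt hlen _ _ _
      rw [pvLoopB]
      refine ⟨hlen, ?_, by push_cast; ring⟩
      intro j hj
      simp
    | cons x rest ihs =>
      intro cnt hlen hk hLab hMk
      have hall : ∀ v ∈ pvNbrs g x, pvVis vis v = true := by
        intro v hv
        cases hc : pvVis vis v with
        | true => rfl
        | false => exact absurd hk (by have := pvVis_pos_free hc; omega)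
      rw [pvLoopB_cons, pvInner_of_all_visited _ _ _ _ hall]
      obtain ⟨h1, h2, h3⟩ := ihs vis cnt hlen hk
        (fun y hy => hLab y (List.mem_cons_of_mem x hy))
        (fun y hy => hMk y (List.mem_cons_of_mem x hy))
      refine ⟨h1, ?_, h3⟩
      intro j hj
      rw [h2 j hj]
      constructor
      · rintro (h | ⟨w, hwm, hrest⟩)
        · exact Or.inl h
        · exact Or.inr ⟨w, List.mem_cons_of_mem x hwm, hrest⟩
      · rintro (h | ⟨w, hwm, i, hidx, hri⟩)
        · exact Or.inl h
        · rcases List.mem_cons.mp hwm with rfl | hwm'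
          · -- reach from w is trivial when everything is visited
            rcases (Relation.ReflTransGen.cases_head hri) with rfl | ⟨y1, hst1, _⟩
            · left
              have hidx' : PySem.List.pyIdx? vis.length w = some j := by
                rw [hlen]; exact hidx
              rw [← pvVis_slot hidx']
              exact hMk w List.mem_cons_self
            · exact absurd hst1.2 (by simp [hall y1 hst1.1])
          · exact Or.inr ⟨w, hwm', i, hidx, hri⟩
  | succ k ih =>
    intro vis st
    induction st generalizing vis with
    | nil =>
      intro cnt hlen _ _ _
      rw [pvLoopB]
      refine ⟨hlen, ?_, by push_cast; ring⟩
      intro j hj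
      simp
    | cons x rest ihs =>
      intro cnt hlen hk hLab hMk
      have hxLab : Lab x := hLab x List.mem_cons_self
      have hinj' : ∀ v w, v ∈ pvNbrs g x → w ∈ pvNbrs g x → pvVis vis w = false →
          PySem.List.pyIdx? vis.length v = PySem.List.pyIdx? vis.length w → v = w := by
        intro v w hv hw hwf heq
        have hws : (PySem.List.pyIdx? L w).isSome = true := pvVis_false_isSome hlen hwf
        have heqL : PySem.List.pyIdx? L v = PySem.List.pyIdx? L w := by
          rw [← hlen]; exact heq
        have hvs : (PySem.List.pyIdx? L v).isSome = true := by rw [heqL]; exact hws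
        exact hinj v w (hadj x v hxLab hv hvs) (hadj x w hxLab hw hws) hvs heqL
      rcases pvInner_id_or_lt (pvNbrs g x) rest cnt vis with hall | hlt
      · -- no neighbour is new: the fold is the identity and the stack shrinks
        rw [pvLoopB_cons, pvInner_of_all_visited _ _ _ _ hall]
        obtain ⟨h1, h2, h3⟩ := ihs vis cnt hlen hk
          (fun y hy => hLab y (List.mem_cons_of_mem x hy))
          (fun y hy => hMk y (List.mem_cons_of_mem x hy))
        refine ⟨h1, ?_, h3⟩
        intro j hj
        rw [h2 j hj]
        constructor
        · rintro (h | ⟨w, hwm, hrest⟩)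
          · exact Or.inl h
          · exact Or.inr ⟨w, List.mem_cons_of_mem x hwm, hrest⟩
        · rintro (h | ⟨w, hwm, i, hidx, hri⟩)
          · exact Or.inl h
          · rcases List.mem_cons.mp hwm with rfl | hwm'
            · rcases (Relation.ReflTransGen.cases_head hri) with rfl | ⟨y1, hst1, htl1⟩
              · left
                have hidx' : PySem.List.pyIdx? vis.length w = some j := by
                  rw [hlen]; exact hidx
                rw [← pvVis_slot hidx']
                exact hMk w List.mem_cons_self
              · exact absurd hst1.2 (by simp [hall y1 hst1.1])
            · exact Or.inr ⟨w, hwm', i, hidx, hri⟩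
      · -- at least one neighbour is newly marked: pvFree drops, use the outer IH
        set r := pvInner (pvNbrs g x) rest cnt vis with hr
        have hlenr : r.2.2.length = L := by rw [hr, pvInner_length]; exact hlen
        have hmono : ∀ b : Int, pvVis vis b = true → pvVis r.2.2 b = true := by
          intro b hb; rw [hr]; exact pvInner_vis_mono _ _ _ _ b hb
        have hslots : ∀ j, j < L → (r.2.2.getD j true = true ↔ vis.getD j true = true ∨
            ∃ v ∈ pvNbrs g x, pvVis vis v = false ∧ PySem.List.pyIdx? L v = some j) := by
          intro j hj
          rw [hr, pvInner_slot, hlen]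
        have hstL : ∀ y ∈ r.1, Lab y := by
          intro y hy
          rcases pvInner_stack_sub _ _ _ _ y hy with h | ⟨h1, h2⟩
          · exact hLab y (List.mem_cons_of_mem x h)
          · exact hadj x y hxLab h1 (pvVis_false_isSome hlen h2)
        have hstM : ∀ y ∈ r.1, pvVis r.2.2 y = true := by
          intro y hy
          rcases pvInner_stack_sub _ _ _ _ y hy with h | ⟨h1, h2⟩
          · exact hmono y (hMk y (List.mem_cons_of_mem x h))
          · obtain ⟨ky, hky, hkyL, _⟩ := pvVis_false_slot h2
            have hky' : PySem.List.pyIdx? r.2.2.length y = some ky := by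
              rw [hlenr, ← hlen]; exact hky
            rw [pvVis_slot hky']
            exact (hslots ky (by omega)).mpr (Or.inr ⟨y, h1, h2, by rw [← hlen]; exact hky⟩)
        obtain ⟨h1, h2, h3⟩ := ih r.2.2 r.1 r.2.1 hlenr (by omega) hstL hstM
        rw [pvLoopB_cons, ← hr]
        have hcnt : r.2.1 = cnt + (pvFree vis : Int) - (pvFree r.2.2 : Int) := by
          rw [hr]; exact pvInner_cnt _ _ _ _
        refine ⟨h1, ?_, by rw [h3, hcnt]; ring⟩
        intro j hj
        rw [h2 j hj]
        constructor
        · rintro (h | ⟨w, hwm, i, hidx, hri⟩)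
          · rcases (hslots j hj).mp h with h' | ⟨v0, hv0m, hv0f, hv0idx⟩
            · exact Or.inl h'
            · exact Or.inr ⟨x, List.mem_cons_self, v0, hv0idx,
                Relation.ReflTransGen.single ⟨hv0m, hv0f⟩⟩
          · have hri' : pvReach g vis w i := pvReach_anti hmono hri
            rcases pvInner_stack_sub _ _ _ _ w hwm with h' | ⟨h1', h2'⟩
            · exact Or.inr ⟨w, List.mem_cons_of_mem x h', i, hidx, hri'⟩
            · exact Or.inr ⟨x, List.mem_cons_self, i, hidx,
                Relation.ReflTransGen.head ⟨h1', h2'⟩ hri'⟩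
        · rintro (h | ⟨w, hwm, i, hidx, hri⟩)
          · exact Or.inl ((hslots j hj).mpr (Or.inl h))
          · rcases List.mem_cons.mp hwm with rfl | hwrest
            · -- w = x: peel the first step of the path
              rcases (Relation.ReflTransGen.cases_head hri) with rfl | ⟨y1, hst1, htl1⟩
              · left
                refine (hslots j hj).mpr (Or.inl ?_)
                have hidx' : PySem.List.pyIdx? vis.length w = some j := by
                  rw [hlen]; exact hidx
                rw [← pvVis_slot hidx']
                exact hMk w List.mem_cons_self
              · have hy1Lab : Lab y1 := hadj w y1 hxLab hst1.1 (pvVis_false_isSome hlen hst1.2)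
                rcases pvAbsorbFold hadj hinj hlen hlenr hxLab hmono hslots hy1Lab htl1 with
                  hv' | ⟨w', hw'm, hw'r⟩
                · left
                  have hidx' : PySem.List.pyIdx? r.2.2.length i = some j := by
                    rw [hlenr]; exact hidx
                  rw [← pvVis_slot hidx']
                  exact hv'
                · refine Or.inr ⟨w', ?_, i, hidx, hw'r⟩
                  rcases hw'm with hww | ⟨hnb, hnf⟩
                  · subst hww
                    rw [hr]
                    exact pvInner_stack_sup _ _ _ _ hinj' w' hst1.1 hst1.2
                  · rw [hr]
                    exact pvInner_stack_sup _ _ _ _ hinj' w' hnb hnf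
            · have hwLab : Lab w := hLab w (List.mem_cons_of_mem x hwrest)
              rcases pvAbsorbFold hadj hinj hlen hlenr hxLab hmono hslots hwLab hri with
                hv' | ⟨w', hw'm, hw'r⟩
              · left
                have hidx' : PySem.List.pyIdx? r.2.2.length i = some j := by
                  rw [hlenr]; exact hidx
                rw [← pvVis_slot hidx']
                exact hv'
              · refine Or.inr ⟨w', ?_, i, hidx, hw'r⟩
                rcases hw'm with hww | ⟨hnb, hnf⟩
                · subst hww
                  rw [hr]
                  exact pvInner_stack_mono _ _ _ _ w' hwrest
                · rw [hr]
                  exact pvInner_stack_sup _ _ _ _ hinj' w' hnb hnf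


-- single-call equality for an unvisited labelled start (no invariant needed)
lemma pvCall_eq_open (g : PySem.Dict Int (PySem.Set Int)) (L : Nat) (Lab : Int → Prop)
    (hadj : pvAdjOK g L Lab) (hinj : pvInj L Lab) (vis : List Bool) (hlen : vis.length = L)
    (u : Int) (huLab : Lab u) (hu : pvVis vis u = false) :
    (pvDfsA g vis u).1 = pvExploreB g vis u ∧
    (∀ j, j < L → ((pvExploreB g vis u).2.getD j true = true ↔
      (vis.getD j true = true ∨
        ∃ i : Int, PySem.List.pyIdx? L i = some j ∧ pvReach g vis u i))) ∧
    (pvExploreB g vis u).2.length = L := by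
  obtain ⟨ku, hku, hkuL, hkuf⟩ := pvVis_false_slot hu
  have hkuLidx : PySem.List.pyIdx? L u = some ku := by rw [← hlen]; exact hku
  have hlen1 : (pvMark vis u).length = L := (pvMark_length vis u).trans hlen
  have hfree1 := pvFree_mark_eq hu
  have hku1 : PySem.List.pyIdx? (pvMark vis u).length u = some ku := by
    rw [pvMark_length]; exact hku
  have humk : pvVis (pvMark vis u) u = true := by
    rw [pvVis_slot hku1, pvMark_slot hku]
    simp
  obtain ⟨halen, hachr, hacnt⟩ :=
    (pvMainA g L Lab hadj hinj (pvFree vis)).1 vis u hlen le_rfl huLab hu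
  obtain ⟨hblen, hbchr, hbcnt⟩ :=
    pvMainB g L Lab hadj hinj (pvFree (pvMark vis u)) (pvMark vis u) [u] 1 hlen1 le_rfl
      (by intro x hx; rw [List.mem_singleton] at hx; subst hx; exact huLab)
      (by intro x hx; rw [List.mem_singleton] at hx; subst hx; exact humk)
  have hmono1 : ∀ b : Int, pvVis vis b = true → pvVis (pvMark vis u) b = true :=
    fun b hb => pvVis_mark_mono u b hb
  have hchr2 : ∀ j, j < L →
      ((pvExploreB g vis u).2.getD j true = true ↔
        (vis.getD j true = true ∨
          ∃ i : Int, PySem.List.pyIdx? L i = some j ∧ pvReach g vis u i)) := by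
    intro j hj
    show ((pvLoopB g [u] 1 (pvMark vis u)).2.getD j true = true ↔ _)
    rw [hbchr j hj]
    constructor
    · rintro (h | ⟨w, hwm, i, hidx, hri⟩)
      · rw [pvMark_slot hku j] at h
        rcases Bool.or_eq_true_iff.mp h with h' | h'
        · exact Or.inl h'
        · exact Or.inr ⟨u, by rw [of_decide_eq_true h']; exact hkuLidx,
            Relation.ReflTransGen.refl⟩
      · rw [List.mem_singleton] at hwm
        subst hwm
        exact Or.inr ⟨i, hidx, pvReach_anti hmono1 hri⟩
    · rintro (h | ⟨i, hidx, hri⟩)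
      · left
        rw [pvMark_slot hku j, h]
        rfl
      · rcases pvAbsorbMark hadj hinj hlen huLab hku huLab hu hri with
          hv1 | ⟨w', hw'm, hw'f, hw'r⟩
        · left
          have hidx' : PySem.List.pyIdx? (pvMark vis u).length i = some j := by
            rw [hlen1]; exact hidx
          rw [← pvVis_slot hidx']
          exact hv1
        · rcases hw'm with rfl | hmem
          · rw [humk] at hw'f; cases hw'f
          · exact Or.inr ⟨u, List.mem_singleton_self u, i, hidx,
              Relation.ReflTransGen.head ⟨hmem, hw'f⟩ hw'r⟩
  have hexlen : (pvExploreB g vis u).2.length = L := hblen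
  have hveq : (pvDfsA g vis u).1.2 = (pvExploreB g vis u).2 := by
    apply List.ext_getElem (by rw [halen, hexlen])
    intro j hj1 hj2
    have hjL : j < L := by rw [halen] at hj1; exact hj1
    have h3 : (pvDfsA g vis u).1.2.getD j true = (pvExploreB g vis u).2.getD j true := by
      rw [Bool.eq_iff_iff, hachr j hjL, hchr2 j hjL]
    rw [List.getD_eq_getElem?_getD, List.getD_eq_getElem?_getD,
      List.getElem?_eq_getElem hj1, List.getElem?_eq_getElem hj2] at h3
    simpa using h3
  have hcnt : (pvDfsA g vis u).1.1 = (pvExploreB g vis u).1 := by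
    have : (pvExploreB g vis u).1 = (pvLoopB g [u] 1 (pvMark vis u)).1 := rfl
    rw [hacnt, this, hbcnt, hveq]
    have : (pvLoopB g [u] 1 (pvMark vis u)).2 = (pvExploreB g vis u).2 := rfl
    rw [this]
    omega
  exact ⟨Prod.ext hcnt hveq, hchr2, hexlen⟩

-- single-call equality for any labelled start (visited or not)
lemma pvCall_eq (g : PySem.Dict Int (PySem.Set Int)) (L : Nat) (Lab : Int → Prop)
    (hadj : pvAdjOK g L Lab) (hinj : pvInj L Lab)
    (vis : List Bool) (hlen : vis.length = L) (u : Int) (huLab : Lab u) :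
    (pvDfsA g vis u).1 = pvExploreB g vis u ∧ (pvExploreB g vis u).2.length = L := by
  by_cases hu : pvVis vis u = false
  · obtain ⟨hpair, _, hblen⟩ := pvCall_eq_open g L Lab hadj hinj vis hlen u huLab hu
    exact ⟨hpair, hblen⟩
  · have hu' : pvVis vis u = true := by
      cases hc : pvVis vis u with
      | true => rfl
      | false => exact absurd hc hu
    have hmk : pvMark vis u = vis := pvMark_of_vis hu'
    obtain ⟨halen, hachr, hacnt⟩ :=
      (pvMainA g L Lab hadj hinj (pvFree vis)).2 vis (pvNbrs g u) 1 hlen le_rfl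
        (fun w hw hs => hadj u w huLab hw hs)
    obtain ⟨hblen, hbchr, hbcnt⟩ :=
      pvMainB g L Lab hadj hinj (pvFree vis) vis [u] 1 hlen le_rfl
        (by intro x hx; rw [List.mem_singleton] at hx; subst hx; exact huLab)
        (by intro x hx; rw [List.mem_singleton] at hx; subst hx; exact hu')
    have hdA : (pvDfsA g vis u).1 = (pvGoA g (pvNbrs g u) 1 vis).1 := by
      have h1 : (pvDfsA g vis u).1 = (pvGoA g (pvNbrs g u) 1 (pvMark vis u)).1 := by
        rw [pvDfsA]
      rw [h1, hmk]
    have hdB : pvExploreB g vis u = pvLoopB g [u] 1 vis := by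
      show pvLoopB g [u] 1 (pvMark vis u) = _
      rw [hmk]
    have hchr : ∀ j, j < L →
        ((pvGoA g (pvNbrs g u) 1 vis).1.2.getD j true =
          (pvLoopB g [u] 1 vis).2.getD j true) := by
      intro j hj
      rw [Bool.eq_iff_iff, hachr j hj, hbchr j hj]
      constructor
      · rintro (h | ⟨w, hwm, hwf, i, hidx, hri⟩)
        · exact Or.inl h
        · exact Or.inr ⟨u, List.mem_singleton_self u, i, hidx,
            Relation.ReflTransGen.head ⟨hwm, hwf⟩ hri⟩
      · rintro (h | ⟨w, hwm, i, hidx, hri⟩)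
        · exact Or.inl h
        · rw [List.mem_singleton] at hwm
          subst hwm
          rcases Relation.ReflTransGen.cases_head hri with rfl | ⟨y1, hst1, htl1⟩
          · left
            have hidx' : PySem.List.pyIdx? vis.length w = some j := by
              rw [hlen]; exact hidx
            rw [← pvVis_slot hidx']
            exact hu'
          · exact Or.inr ⟨y1, hst1.1, hst1.2, i, hidx, htl1⟩
    have hveq : (pvGoA g (pvNbrs g u) 1 vis).1.2 = (pvLoopB g [u] 1 vis).2 := by
      apply List.ext_getElem (by rw [halen, hblen])
      intro j hj1 hj2
      have hjL : j < L := by rw [halen] at hj1; exact hj1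
      have h3 := hchr j hjL
      rw [List.getD_eq_getElem?_getD, List.getD_eq_getElem?_getD,
        List.getElem?_eq_getElem hj1, List.getElem?_eq_getElem hj2] at h3
      simpa using h3
    have hcnt : (pvGoA g (pvNbrs g u) 1 vis).1.1 = (pvLoopB g [u] 1 vis).1 := by
      rw [hacnt, hbcnt, hveq]
    rw [hdA, hdB]
    exact ⟨Prod.ext hcnt hveq, hblen⟩

lemma pvIdx_eq_cases {L : Nat} {a b : Int} (hsome : (PySem.List.pyIdx? L a).isSome = true)
    (heq : PySem.List.pyIdx? L a = PySem.List.pyIdx? L b) :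
    a = b ∨ a = b + L ∨ b = a + L := by
  unfold PySem.List.pyIdx? at hsome heq
  split_ifs at hsome heq <;> simp_all <;> omega

lemma pvEdged_mem_used {g_nodes : Int} {g_from g_to ds : List Int} {x : Int}
    (h : pvEdged g_nodes g_from g_to x) : x ∈ pvUsed g_from g_to ds := by
  unfold pvUsed
  obtain ⟨_, q, hq, hc⟩ := h
  refine List.mem_append_left _ (List.mem_flatMap.mpr ⟨q, hq, ?_⟩)
  rcases hc with ⟨h1, _⟩ | ⟨h1, _⟩ <;> simp [← h1]

lemma pvGraph_hadj {g_nodes : Int} (g_from g_to : List Int) (hn0 : 0 ≤ g_nodes) :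
    pvAdjOK (pvGraph g_from g_to) g_nodes.toNat
      (fun a => pvEdged g_nodes g_from g_to (a + 1)) := by
  intro a b hLa hb hbs
  unfold pvGraph at hb
  rcases pvGraph_mem_aux (g_from.zip g_to) PySem.Dict.empty a b hb with h | ⟨p, hpm, hc⟩
  · rw [pvNbrs_empty] at h; cases h
  · have hn : (g_nodes.toNat : Int) = g_nodes := Int.toNat_of_nonneg hn0
    rw [pvIdx_isSome_iff, hn] at hbs
    have hbInR : pvInR g_nodes (b + 1) := ⟨by omega, by omega⟩
    have haInR : pvInR g_nodes (a + 1) := hLa.1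
    rcases hc with ⟨ha1, hb1⟩ | ⟨ha1, hb1⟩
    · exact ⟨hbInR, p, hpm, Or.inr ⟨by omega,
        by rw [show p.1 = a + 1 by omega]; exact haInR⟩⟩
    · exact ⟨hbInR, p, hpm, Or.inl ⟨by omega,
        by rw [show p.2 = a + 1 by omega]; exact haInR⟩⟩

lemma pvGraph_hinj {g_nodes : Int} {g_from g_to ds : List Int} (hn0 : 0 ≤ g_nodes)
    (hna : ∀ x ∈ pvUsed g_from g_to ds, ∀ y ∈ pvUsed g_from g_to ds,
      pvEdged g_nodes g_from g_to x → pvEdged g_nodes g_from g_to y →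
      y ≠ x + g_nodes) :
    pvInj g_nodes.toNat (fun a => pvEdged g_nodes g_from g_to (a + 1)) := by
  intro a b hLa hLb hsome heq
  have h1 := hna (a + 1) (pvEdged_mem_used (ds := ds) hLa) (b + 1)
    (pvEdged_mem_used (ds := ds) hLb) hLa hLb
  have h2 := hna (b + 1) (pvEdged_mem_used (ds := ds) hLb) (a + 1)
    (pvEdged_mem_used (ds := ds) hLa) hLb hLa
  have hn : (g_nodes.toNat : Int) = g_nodes := Int.toNat_of_nonneg hn0
  rcases pvIdx_eq_cases hsome heq with h | h | h <;> omega

-- a label mentioned by no edge pair has no neighbours in the adjacency dict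
lemma pvGraph_nbrs_nil_aux (ps : List (Int × Int)) (x : Int)
    (h : ∀ p ∈ ps, p.1 - 1 ≠ x ∧ p.2 - 1 ≠ x) :
    ∀ g0 : PySem.Dict Int (PySem.Set Int), pvNbrs g0 x = [] →
      pvNbrs (ps.foldl
        (fun g p =>
          let g1 := g.insert (p.1 - 1) (PySem.Set.add (g.getD (p.1 - 1) PySem.Set.empty) (p.2 - 1))
          g1.insert (p.2 - 1) (PySem.Set.add (g1.getD (p.2 - 1) PySem.Set.empty) (p.1 - 1))) g0) x = [] := by
  induction ps with
  | nil => intro g0 h0; exact h0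
  | cons q ps ih =>
    intro g0 h0
    refine ih (fun p hp => h p (List.mem_cons_of_mem q hp)) _ ?_
    rw [pvNbrs_insert, if_neg (fun he => (h q List.mem_cons_self).2 he.symm),
      pvNbrs_insert, if_neg (fun he => (h q List.mem_cons_self).1 he.symm)]
    exact h0

lemma pvGraph_nbrs_nil (g_from g_to : List Int) (x : Int)
    (h : ∀ p ∈ g_from.zip g_to, p.1 - 1 ≠ x ∧ p.2 - 1 ≠ x) :
    pvNbrs (pvGraph g_from g_to) x = [] := by
  unfold pvGraph
  exact pvGraph_nbrs_nil_aux (g_from.zip g_to) x h PySem.Dict.empty (pvNbrs_empty x)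

-- fold over the disconnected nodes: every start is labelled or has no neighbours
lemma pvFold1 (g : PySem.Dict Int (PySem.Set Int)) (L : Nat) (Lab : Int → Prop)
    (hadj : pvAdjOK g L Lab) (hinj : pvInj L Lab) :
    ∀ (ds : List Int) (acc : List Int) (vis : List Bool), vis.length = L →
      (∀ d ∈ ds, Lab (d - 1) ∨ pvNbrs g (d - 1) = []) →
      (ds.foldl (fun (st : List Int × List Bool) ele =>
          let r := pvDfsA g st.2 (ele - 1)
          (st.1 ++ [r.1.1], r.1.2)) (acc, vis)) =
      (ds.foldl (fun (st : List Int × List Bool) ele =>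
          let r := pvExploreB g st.2 (ele - 1)
          (st.1 ++ [r.1], r.2)) (acc, vis)) ∧
      ((ds.foldl (fun (st : List Int × List Bool) ele =>
          let r := pvExploreB g st.2 (ele - 1)
          (st.1 ++ [r.1], r.2)) (acc, vis)).2).length = L := by
  intro ds
  induction ds with
  | nil => intro acc vis hlen _; exact ⟨rfl, hlen⟩
  | cons d ds ih =>
    intro acc vis hlen hb
    rcases hb d List.mem_cons_self with hLab | hnil
    · obtain ⟨hpair, hlen'⟩ := pvCall_eq g L Lab hadj hinj vis hlen (d - 1) hLab
      simp only [List.foldl_cons]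
      rw [hpair]
      exact ih (acc ++ [(pvExploreB g vis (d - 1)).1]) (pvExploreB g vis (d - 1)).2 hlen'
        (fun d' hd' => hb d' (List.mem_cons_of_mem d hd'))
    · have hA : (pvDfsA g vis (d - 1)).1 = (1, pvMark vis (d - 1)) := by
        have h1 : (pvDfsA g vis (d - 1)).1 =
            (pvGoA g (pvNbrs g (d - 1)) 1 (pvMark vis (d - 1))).1 := by
          rw [pvDfsA]
        rw [h1, hnil, pvGoA]
      have hB : pvExploreB g vis (d - 1) = (1, pvMark vis (d - 1)) := by
        show pvLoopB g [d - 1] 1 (pvMark vis (d - 1)) = _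
        rw [pvLoopB_cons, hnil]
        simp only [pvInner, List.foldl_nil]
        rw [pvLoopB]
      simp only [List.foldl_cons]
      rw [hA, hB]
      exact ih (acc ++ [(1 : Int)]) (pvMark vis (d - 1))
        ((pvMark_length vis (d - 1)).trans hlen)
        (fun d' hd' => hb d' (List.mem_cons_of_mem d hd'))

-- fold over range(n): every start is labelled or has no neighbours
lemma pvFold2 (g : PySem.Dict Int (PySem.Set Int)) (L : Nat) (Lab : Int → Prop)
    (hadj : pvAdjOK g L Lab) (hinj : pvInj L Lab) :
    ∀ (is_ : List Int) (a : Int) (vis : List Bool), vis.length = L →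
      (∀ i ∈ is_, Lab i ∨ pvNbrs g i = []) →
      (is_.foldl (fun (st : Int × List Bool) i =>
          if pvVis st.2 i = false then
            let r := pvDfsA g st.2 i
            (st.1 - (r.1.1 - 1), r.1.2)
          else st) (a, vis)) =
      (is_.foldl (fun (st : Int × List Bool) i =>
          if pvVis st.2 i = false then
            let r := pvExploreB g st.2 i
            (st.1 - (r.1 - 1), r.2)
          else st) (a, vis)) := by
  intro is_
  induction is_ with
  | nil => intro a vis _ _; rfl
  | cons i is_ ih =>
    intro a vis hlen hb
    have hbt : ∀ i' ∈ is_, Lab i' ∨ pvNbrs g i' = [] :=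
      fun i' hi' => hb i' (List.mem_cons_of_mem i hi')
    simp only [List.foldl_cons]
    by_cases hv : pvVis vis i = false
    · rcases hb i List.mem_cons_self with hiLab | hnil
      · obtain ⟨hpair, hlen'⟩ := pvCall_eq g L Lab hadj hinj vis hlen i hiLab
        rw [if_pos hv, if_pos hv, hpair]
        exact ih _ _ hlen' hbt
      · have hA : (pvDfsA g vis i).1 = (1, pvMark vis i) := by
          have h1 : (pvDfsA g vis i).1 = (pvGoA g (pvNbrs g i) 1 (pvMark vis i)).1 := by
            rw [pvDfsA]
          rw [h1, hnil, pvGoA]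
        have hB : pvExploreB g vis i = (1, pvMark vis i) := by
          show pvLoopB g [i] 1 (pvMark vis i) = _
          rw [pvLoopB_cons, hnil]
          simp only [pvInner, List.foldl_nil]
          rw [pvLoopB]
        rw [if_pos hv, if_pos hv, hA, hB]
        exact ih _ _ ((pvMark_length vis i).trans hlen) hbt
    · rw [if_neg hv, if_neg hv]
      exact ih a vis hlen hbt

-- ===== VERDICT (by name: the statement is the Claim_ definition above) =====
theorem getMaxNewEdges_spec : Claim_equal_getMaxNewEdges := by
  intro n f t ds _ hpre
  obtain ⟨hne, hp, hd, hna⟩ := hpre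
  have hn1 : 1 ≤ n := by
    obtain ⟨d, hdm⟩ := List.exists_mem_of_ne_nil ds hne
    have := hd d hdm
    omega
  have hn0 : 0 ≤ n := by omega
  have hnL : ((n.toNat : Nat) : Int) = n := Int.toNat_of_nonneg hn0
  have hadj := pvGraph_hadj (g_nodes := n) f t hn0
  have hinj := pvGraph_hinj (g_from := f) (g_to := t) (ds := ds) hn0 hna
  have hlen0 : (List.replicate n.toNat false).length = n.toNat := by simp
  have hdb : ∀ d ∈ ds, pvEdged n f t ((d - 1) + 1) ∨ pvNbrs (pvGraph f t) (d - 1) = [] := by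
    intro d hdm
    by_cases he : pvEdged n f t d
    · left
      rw [show d - 1 + 1 = d by ring]
      exact he
    · right
      apply pvGraph_nbrs_nil
      intro p hpm
      have hdin : pvInR n d := ⟨(hd d hdm).1, (hd d hdm).2⟩
      constructor
      · intro heq
        have hp1 : p.1 = d := by omega
        rcases hp p hpm with ⟨h1, h2⟩ | ⟨h1, _⟩ | ⟨h1, _⟩ | ⟨_, _, _, hi⟩
        · exact he ⟨hdin, p, hpm, Or.inl ⟨hp1, h2⟩⟩
        · exact h1 (hp1 ▸ hdin)
        · exact h1 (hp1 ▸ hdin)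
        · exact hi.1 (hp1 ▸ hdm)
      · intro heq
        have hp2 : p.2 = d := by omega
        rcases hp p hpm with ⟨h1, h2⟩ | ⟨_, h2⟩ | ⟨_, _, _, hi⟩ | ⟨h2, _⟩
        · exact he ⟨hdin, p, hpm, Or.inr ⟨hp2, h1⟩⟩
        · exact h2 (hp2 ▸ hdin)
        · exact hi.1 (hp2 ▸ hdm)
        · exact h2 (hp2 ▸ hdin)
  obtain ⟨hfold1, hlen1⟩ :=
    pvFold1 (pvGraph f t) n.toNat (fun a => pvEdged n f t (a + 1)) hadj hinj
      ds [] (List.replicate n.toNat false) hlen0 hdb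
  have hb2 : ∀ i ∈ PySem.List.pyRange 0 n 1,
      pvEdged n f t (i + 1) ∨ pvNbrs (pvGraph f t) i = [] := by
    intro i him
    rw [PySem.List.mem_pyRange_one] at him
    have hiin : pvInR n (i + 1) := ⟨by omega, by omega⟩
    by_cases he : pvEdged n f t (i + 1)
    · exact Or.inl he
    · right
      apply pvGraph_nbrs_nil
      intro p hpm
      constructor
      · intro heq
        have hp1 : p.1 = i + 1 := by omega
        rcases hp p hpm with ⟨h1, h2⟩ | ⟨h1, _⟩ | ⟨h1, _⟩ | ⟨_, _, hle, _⟩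
        · exact he ⟨hiin, p, hpm, Or.inl ⟨hp1, h2⟩⟩
        · exact h1 (hp1 ▸ hiin)
        · exact h1 (hp1 ▸ hiin)
        · omega
      · intro heq
        have hp2 : p.2 = i + 1 := by omega
        rcases hp p hpm with ⟨h1, h2⟩ | ⟨_, h2⟩ | ⟨_, _, hle, _⟩ | ⟨h2, _⟩
        · exact he ⟨hiin, p, hpm, Or.inr ⟨hp2, h1⟩⟩
        · exact h2 (hp2 ▸ hiin)
        · omega
        · exact h2 (hp2 ▸ hiin)
  show getMaxNewEdges n f t ds = getMaxNewEdges_alt n f t ds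
  simp only [getMaxNewEdges, getMaxNewEdges_alt]
  rw [hfold1]
  rw [pvFold2 (pvGraph f t) n.toNat (fun a => pvEdged n f t (a + 1)) hadj hinj
    (PySem.List.pyRange 0 n 1) _ _ hlen1 hb2]
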